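-- pv_equiv track=rewrite | github.com/huynonstop/grinding-leetcode | hackerrank/riddle.py | riddle
-- ===== SOURCE A (Python) =====
-- def riddle(arr):
--     # complete this function
--     n = len(arr)
--     res = []
--     cur_min = arr[:]
--     for i in range(n):
--         cur_max = None
--         for j in range(n - i):
--             cur_min[j] = min(cur_min[j], arr[j + i])
--             cur_max = cur_min[j] if not cur_max else max(
--                 cur_max, cur_min[j])
--         res.append(cur_max)
--     return res
-- ===== SOURCE B (Python) =====
-- def riddle(arr):
--     # Monotonic-stack reimplementation: for each element find the maximal window
--     # (span) in which it is the minimum, then fill answers by window size and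
--     # take suffix maxima.  O(n) instead of A's O(n^2).
--     n = len(arr)
--     left = [-1] * n    # nearest index to the left with a strictly smaller value
--     right = [n] * n    # nearest index to the right with a strictly smaller value
--     stack = []
--     for i in range(n):
--         while stack and arr[stack[-1]] >= arr[i]:
--             stack.pop()
--         left[i] = stack[-1] if stack else -1
--         stack.append(i)
--     stack = []
--     for i in range(n - 1, -1, -1):
--         while stack and arr[stack[-1]] >= arr[i]:
--             stack.pop()
--         right[i] = stack[-1] if stack else n
--         stack.append(i)
--     best = [None] * (n + 1)   # best[w] = max value whose span is exactly w
--     for i in range(n):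
--         w = right[i] - left[i] - 1
--         if best[w] is None or arr[i] > best[w]:
--             best[w] = arr[i]
--     res = [0] * n
--     cur = None
--     for w in range(n, 0, -1):
--         if best[w] is not None and (cur is None or best[w] > cur):
--             cur = best[w]
--         res[w - 1] = cur
--     return res
-- ===== Notes on version B (the rewrite author's own statement) =====
-- stated objective: faster
-- what changed: Replaces A's O(n^2) incremental window-minimum table (and its running-max fold) with a monotonic-stack computation of each element's min-dominant span, a fill of the best value per exact span, and one suffix-max pass.
-- intended difference: On arrays where for some window size w the maximum of the size-w window minimums is 0 while the minimum of the last size-w window is negative, A's falsy test 'if not cur_max' resets its running maximum when it reaches 0 and returns a negative value for that window size, whereas B returns the intended maximum 0. — e.g. on riddle([0, -1]): A returns [-1, -1], B returns [0, -1]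
import Mathlib
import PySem

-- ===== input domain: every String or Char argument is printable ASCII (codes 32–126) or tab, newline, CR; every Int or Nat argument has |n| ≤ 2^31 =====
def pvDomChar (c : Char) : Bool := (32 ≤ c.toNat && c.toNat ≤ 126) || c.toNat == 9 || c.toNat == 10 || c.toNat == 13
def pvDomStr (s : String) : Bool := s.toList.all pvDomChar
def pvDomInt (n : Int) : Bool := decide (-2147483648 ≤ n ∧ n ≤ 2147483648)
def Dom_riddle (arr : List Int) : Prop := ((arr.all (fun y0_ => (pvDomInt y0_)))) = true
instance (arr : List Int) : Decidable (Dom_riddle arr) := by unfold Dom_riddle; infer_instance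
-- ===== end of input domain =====

-- B is the standard O(n) monotonic-stack algorithm for "max of window minimums per window size";
-- A is the original O(n^2) table; A's falsy test `if not cur_max` makes it wrong where the answer is 0 (see D_riddle).

-- ===== PORT A =====
-- A's inline conditional `cur_min[j] if not cur_max else max(cur_max, cur_min[j])`
-- (`not cur_max` is true for both None and 0).
def bstep (cx : Option Int) (v : Int) : Option Int :=
  match cx with
  | none => some v
  | some m => if m = 0 then some v else some (max m v)

-- body of A's inner `for j in range(n - i)` loop; all list indices are in range, so getD's default is never read
def innerStepA (arr : List Int) (i : Nat) (st : List Int × Option Int) (j : Nat) : List Int × Option Int :=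
  let v := min (st.1.getD j 0) (arr.getD (j + i) 0)
  (st.1.set j v, bstep st.2 v)

-- body of A's outer `for i in range(n)` loop; `cur_max` is provably `some _` when appended, so `.getD 0` is never the default
def outerStepA (arr : List Int) (st : List Int × List Int) (i : Nat) : List Int × List Int :=
  let inner := (List.range (arr.length - i)).foldl (innerStepA arr i) (st.1, none)
  (inner.1, st.2 ++ [inner.2.getD 0])

def riddle (arr : List Int) : List Int :=
  ((List.range arr.length).foldl (outerStepA arr) (arr, [])).2

-- ===== PORT B =====
-- B's `while stack and arr[stack[-1]] >= arr[i]: stack.pop()` (stack head = top of stack)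
def popGE (arr : List Int) (v : Int) : List Nat → List Nat
  | [] => []
  | t :: rest => if v ≤ arr.getD t 0 then popGE arr v rest else t :: rest

-- B's `stack[-1] if stack else d`
def topD (s : List Nat) (d : Int) : Int :=
  match s with
  | [] => d
  | t :: _ => (t : Int)

-- body of B's first (left-to-right) stack loop
def leftStep (arr : List Int) (st : List Int × List Nat) (i : Nat) : List Int × List Nat :=
  (st.1.set i (topD (popGE arr (arr.getD i 0) st.2) (-1)), i :: popGE arr (arr.getD i 0) st.2)

-- body of B's second (right-to-left) stack loop
def rightStep (arr : List Int) (st : List Int × List Nat) (i : Nat) : List Int × List Nat :=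
  (st.1.set i (topD (popGE arr (arr.getD i 0) st.2) (arr.length : Int)),
    i :: popGE arr (arr.getD i 0) st.2)

-- body of B's `best` fill loop: `if best[w] is None or arr[i] > best[w]: best[w] = arr[i]`
def bestStep (arr left right : List Int) (b : List (Option Int)) (i : Nat) : List (Option Int) :=
  match b.getD ((right.getD i 0 - left.getD i 0 - 1).toNat) none with
  | none => b.set ((right.getD i 0 - left.getD i 0 - 1).toNat) (some (arr.getD i 0))
  | some m => if arr.getD i 0 > m then
      b.set ((right.getD i 0 - left.getD i 0 - 1).toNat) (some (arr.getD i 0))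
    else b

-- B's `if best[w] is not None and (cur is None or best[w] > cur): cur = best[w]`
def omaxC (o1 o2 : Option Int) : Option Int :=
  match o1 with
  | none => o2
  | some bv =>
    match o2 with
    | none => some bv
    | some cc => if bv > cc then some bv else some cc

def resCur (best : List (Option Int)) (c : Option Int) (t : Nat) : Option Int :=
  omaxC (best.getD (t + 1) none) c

-- body of B's final suffix-max loop over w = n..1 (t+1 = w); `cur` is provably `some _`
-- when written, so `.getD 0` is never the default
def resStep (best : List (Option Int)) (st : List Int × Option Int) (t : Nat) : List Int × Option Int :=
  (st.1.set t ((resCur best st.2 t).getD 0), resCur best st.2 t)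

def riddle_alt (arr : List Int) : List Int :=
  let n := arr.length
  let left := ((List.range n).foldl (leftStep arr) (List.replicate n (-1), [])).1
  let right := ((List.range n).reverse.foldl (rightStep arr) (List.replicate n (n : Int), [])).1
  let best := (List.range n).foldl (bestStep arr left right) (List.replicate (n + 1) none)
  ((List.range n).reverse.foldl (resStep best) (List.replicate n 0, none)).1

-- ===== PRECONDITION & SPEC =====
-- On arrays where for some window size w the maximum of the size-w window minimums is 0 while the
-- minimum of the last size-w window is negative (i.e. every size-w window has an element ≤ 0, some
-- size-w window is all ≥ 0, and the last w elements contain a negative), A's falsy test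
-- `if not cur_max` resets its running maximum when it reaches 0 and returns a negative value for
-- that window size, whereas B returns the intended maximum 0.
def D_riddle (arr : List Int) : Prop :=
  ∃ w ≤ arr.length,
    (∀ j ≤ arr.length - w, List.any (List.take w (arr.drop j)) (· ≤ 0)) ∧
    (∃ j ≤ arr.length - w, List.all (List.take w (arr.drop j)) (0 ≤ ·)) ∧
    List.any (arr.drop (arr.length - w)) (· < 0)
instance (arr : List Int) : Decidable (D_riddle arr) := by unfold D_riddle; infer_instance

def Spec_riddle (arr : List Int) (out : List Int) : Prop := ¬ D_riddle arr → out = riddle_alt arr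
instance (arr : List Int) (out : List Int) : Decidable (Spec_riddle arr out) := by unfold Spec_riddle; infer_instance

def pvDiffWitness_riddle : List Int := [0, -1]
def pvDiffWitnessOut_riddle : (List Int) × (List Int) := ([-1, -1], [0, -1])

-- ===== CLAIM (what is proved, stated in full; the proofs are below) =====
def Claim_unchanged_riddle : Prop := ∀ (arr : List Int), Dom_riddle arr → Spec_riddle arr (riddle arr)
def Claim_changed_riddle : Prop := Dom_riddle (pvDiffWitness_riddle) ∧ D_riddle (pvDiffWitness_riddle) ∧ riddle (pvDiffWitness_riddle) = pvDiffWitnessOut_riddle.1 ∧ riddle_alt (pvDiffWitness_riddle) = pvDiffWitnessOut_riddle.2 ∧ pvDiffWitnessOut_riddle.1 ≠ pvDiffWitnessOut_riddle.2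
def Claim_exact_riddle : Prop := ∀ (arr : List Int), Dom_riddle arr → D_riddle arr → riddle arr ≠ riddle_alt arr

-- ===== LEMMAS AND PROOFS =====

-- ---- spec layer (proof-only) ----
def listMin : List Int → Int
  | [] => 0
  | x :: xs => xs.foldl min x

-- minimum of the window arr[j .. j+w-1]
def wmin (arr : List Int) (w j : Nat) : Int := listMin ((arr.drop j).take w)

def listMax : List Int → Int
  | [] => 0
  | x :: xs => xs.foldl max x

-- the list of all size-w window minimums, and the intended answer for window size w
def minsL (arr : List Int) (w : Nat) : List Int := (List.range (arr.length - w + 1)).map (wmin arr w)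
def trueAns (arr : List Int) (w : Nat) : Int := listMax (minsL arr w)

-- greatest j < i with Q j (as Int; -1 if none)
def gmax (Q : Nat → Bool) : Nat → Int
  | 0 => -1
  | k + 1 => if Q k then (k : Int) else gmax Q k

-- least j with a ≤ j < n and Q j (as Int; n if none)
def lmin (Q : Nat → Bool) (n a : Nat) : Int :=
  if _h : a < n then (if Q a then (a : Int) else lmin Q n (a + 1)) else (n : Int)
termination_by n - a

def nsl (arr : List Int) (i : Nat) : Int := gmax (fun j => decide (arr.getD j 0 < arr.getD i 0)) i
def nsr (arr : List Int) (i : Nat) : Int := lmin (fun j => decide (arr.getD j 0 < arr.getD i 0)) arr.length (i + 1)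
def spanN (arr : List Int) (i : Nat) : Nat := (nsr arr i - nsl arr i - 1).toNat

-- ---- list extrema ----
theorem listMin_le {l : List Int} {a : Int} (h : a ∈ l) : listMin l ≤ a := by
  cases l with
  | nil => cases h
  | cons x xs =>
    rcases List.mem_cons.mp h with rfl | hx
    · exact (PySem.List.foldl_min_le xs a).1
    · exact (PySem.List.foldl_min_le xs x).2 a hx

theorem listMin_mem {l : List Int} (h : l ≠ []) : listMin l ∈ l := by
  cases l with
  | nil => exact absurd rfl h
  | cons x xs =>
    rcases PySem.List.foldl_min_mem xs x with h1 | h1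
    · show xs.foldl min x ∈ x :: xs
      rw [h1]; exact List.mem_cons_self
    · exact List.mem_cons_of_mem _ h1

theorem le_listMax {l : List Int} {a : Int} (h : a ∈ l) : a ≤ listMax l := by
  cases l with
  | nil => cases h
  | cons x xs =>
    rcases List.mem_cons.mp h with rfl | hx
    · exact (PySem.List.le_foldl_max xs a).1
    · exact (PySem.List.le_foldl_max xs x).2 a hx

theorem listMax_mem {l : List Int} (h : l ≠ []) : listMax l ∈ l := by
  cases l with
  | nil => exact absurd rfl h
  | cons x xs =>
    rcases PySem.List.foldl_max_mem xs x with h1 | h1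
    · show xs.foldl max x ∈ x :: xs
      rw [h1]; exact List.mem_cons_self
    · exact List.mem_cons_of_mem _ h1

theorem listMin_append_singleton {l : List Int} (v : Int) (h : l ≠ []) :
    listMin (l ++ [v]) = min (listMin l) v := by
  cases l with
  | nil => exact absurd rfl h
  | cons x xs => simp [listMin, List.foldl_append]

theorem listMax_append_singleton {l : List Int} (v : Int) (h : l ≠ []) :
    listMax (l ++ [v]) = max (listMax l) v := by
  cases l with
  | nil => exact absurd rfl h
  | cons x xs => simp [listMax, List.foldl_append]

-- ---- windows ----
theorem winList_length {arr : List Int} {w j : Nat} (h : j + w ≤ arr.length) :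
    ((arr.drop j).take w).length = w := by
  simp [List.length_take, List.length_drop]; omega

theorem winList_getElem {arr : List Int} {w j k : Nat} (h : j + w ≤ arr.length) (hk : k < w) :
    ((arr.drop j).take w)[k]'(by rw [winList_length h]; exact hk) = arr.getD (j + k) 0 := by
  rw [List.getElem_take, List.getElem_drop, List.getD_eq_getElem _ _ (by omega)]

theorem mem_win_iff {arr : List Int} {w j : Nat} (h : j + w ≤ arr.length) {x : Int} :
    x ∈ (arr.drop j).take w ↔ ∃ k < w, arr.getD (j + k) 0 = x := by
  rw [List.mem_iff_getElem]
  constructor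
  · rintro ⟨k, hk, hv⟩
    rw [winList_length h] at hk
    exact ⟨k, hk, by rw [← winList_getElem h hk]; exact hv⟩
  · rintro ⟨k, hk, hv⟩
    exact ⟨k, by rw [winList_length h]; exact hk, by rw [winList_getElem h hk]; exact hv⟩

-- D_riddle restated in index form, for the proofs below
theorem D_char (arr : List Int) : D_riddle arr ↔
    ∃ w < arr.length + 1, 1 ≤ w ∧
      (∀ j < arr.length - w + 1, ∃ k < w, arr.getD (j + k) 0 ≤ 0) ∧
      (∃ j < arr.length - w + 1, ∀ k < w, 0 ≤ arr.getD (j + k) 0) ∧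
      (∃ k < w, arr.getD (arr.length - w + k) 0 < 0) := by
  unfold D_riddle
  have hdrop : ∀ w, w ≤ arr.length →
      (arr.drop (arr.length - w)).take w = arr.drop (arr.length - w) := by
    intro w hw
    apply List.take_of_length_le
    rw [List.length_drop]
    omega
  constructor
  · rintro ⟨w, hw, hA, hB, hC⟩
    rw [List.any_eq_true] at hC
    obtain ⟨x0, hx0m, hx0⟩ := hC
    rw [← hdrop w hw] at hx0m
    have hw1 : 1 ≤ w := by
      by_contra h
      have hw0 : w = 0 := by omega
      subst hw0
      simp at hx0m
    refine ⟨w, by omega, hw1, ?_, ?_, ?_⟩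
    · intro j hj
      have := hA j (by omega)
      rw [List.any_eq_true] at this
      obtain ⟨x, hx, hxle⟩ := this
      obtain ⟨k, hk, hkv⟩ := (mem_win_iff (by omega)).mp hx
      exact ⟨k, hk, by rw [hkv]; simpa using hxle⟩
    · obtain ⟨j, hj, hall⟩ := hB
      rw [List.all_eq_true] at hall
      refine ⟨j, by omega, fun k hk => ?_⟩
      have := hall _ ((mem_win_iff (by omega)).mpr ⟨k, hk, rfl⟩)
      simpa using this
    · obtain ⟨k, hk, hkv⟩ := (mem_win_iff (by omega)).mp hx0m
      exact ⟨k, hk, by rw [hkv]; simpa using hx0⟩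
  · rintro ⟨w, hw, hw1, hA, hB, hC⟩
    refine ⟨w, by omega, ?_, ?_, ?_⟩
    · intro j hj
      rw [List.any_eq_true]
      obtain ⟨k, hk, hk0⟩ := hA j (by omega)
      exact ⟨arr.getD (j + k) 0, (mem_win_iff (by omega)).mpr ⟨k, hk, rfl⟩, by simpa using hk0⟩
    · obtain ⟨j, hj, hall⟩ := hB
      refine ⟨j, by omega, ?_⟩
      rw [List.all_eq_true]
      intro x hx
      obtain ⟨k, hk, hkv⟩ := (mem_win_iff (by omega)).mp hx
      simpa [← hkv] using hall k hk
    · rw [List.any_eq_true]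
      obtain ⟨k, hk, hk0⟩ := hC
      refine ⟨arr.getD (arr.length - w + k) 0, ?_, by simpa using hk0⟩
      rw [← hdrop w (by omega)]
      exact (mem_win_iff (by omega)).mpr ⟨k, hk, rfl⟩

theorem wmin_le {arr : List Int} {w j s : Nat} (h : j + w ≤ arr.length)
    (h1 : j ≤ s) (h2 : s < j + w) : wmin arr w j ≤ arr.getD s 0 := by
  unfold wmin
  have hk : s - j < w := by omega
  have : arr.getD s 0 ∈ (arr.drop j).take w := by
    rw [List.mem_iff_getElem]
    refine ⟨s - j, by rw [winList_length h]; exact hk, ?_⟩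
    rw [winList_getElem h hk]
    congr 1; omega
  exact listMin_le this

theorem wmin_mem {arr : List Int} {w j : Nat} (h : j + w ≤ arr.length) (hw : 1 ≤ w) :
    ∃ s, j ≤ s ∧ s < j + w ∧ arr.getD s 0 = wmin arr w j := by
  have hne : (arr.drop j).take w ≠ [] := by
    apply List.ne_nil_of_length_pos
    rw [winList_length h]; omega
  have := listMin_mem hne
  rw [List.mem_iff_getElem] at this
  obtain ⟨k, hk, hval⟩ := this
  rw [winList_length h] at hk
  refine ⟨j + k, by omega, by omega, ?_⟩
  rw [← winList_getElem h hk] at *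
  exact hval

theorem le_wmin_iff {arr : List Int} {w j : Nat} {c : Int} (h : j + w ≤ arr.length) (hw : 1 ≤ w) :
    c ≤ wmin arr w j ↔ ∀ k, k < w → c ≤ arr.getD (j + k) 0 := by
  constructor
  · intro hc k hk
    exact le_trans hc (wmin_le h (by omega) (by omega))
  · intro hc
    obtain ⟨s, hs1, hs2, hs3⟩ := wmin_mem h hw
    rw [← hs3]
    have := hc (s - j) (by omega)
    rw [show j + (s - j) = s by omega] at this
    exact this

theorem wmin_lt_iff {arr : List Int} {w j : Nat} {c : Int} (h : j + w ≤ arr.length) (hw : 1 ≤ w) :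
    wmin arr w j < c ↔ ∃ k, k < w ∧ arr.getD (j + k) 0 < c := by
  constructor
  · intro hc
    obtain ⟨s, hs1, hs2, hs3⟩ := wmin_mem h hw
    exact ⟨s - j, by omega, by rw [show j + (s - j) = s by omega, hs3]; exact hc⟩
  · rintro ⟨k, hk, hkc⟩
    exact lt_of_le_of_lt (wmin_le h (by omega) (by omega)) hkc

theorem wmin_le_iff {arr : List Int} {w j : Nat} {c : Int} (h : j + w ≤ arr.length) (hw : 1 ≤ w) :
    wmin arr w j ≤ c ↔ ∃ k, k < w ∧ arr.getD (j + k) 0 ≤ c := by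
  constructor
  · intro hc
    obtain ⟨s, hs1, hs2, hs3⟩ := wmin_mem h hw
    exact ⟨s - j, by omega, by rw [show j + (s - j) = s by omega, hs3]; exact hc⟩
  · rintro ⟨k, hk, hkc⟩
    exact le_trans (wmin_le h (by omega) (by omega)) hkc

theorem wmin_one {arr : List Int} {j : Nat} (h : j < arr.length) :
    wmin arr 1 j = arr.getD j 0 := by
  have h1 : (1 : Nat) ≤ 1 := le_refl 1
  have := wmin_le (arr := arr) (w := 1) (j := j) (s := j) (by omega) (le_refl j) (by omega)
  obtain ⟨s, hs1, hs2, hs3⟩ := wmin_mem (arr := arr) (w := 1) (j := j) (by omega) h1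
  have : s = j := by omega
  subst this
  omega

theorem wmin_succ {arr : List Int} {w j : Nat} (hw : 1 ≤ w) (h : j + w < arr.length) :
    wmin arr (w + 1) j = min (wmin arr w j) (arr.getD (j + w) 0) := by
  unfold wmin
  have hTake : (arr.drop j).take (w + 1) = (arr.drop j).take w ++ [arr.getD (j + w) 0] := by
    rw [List.take_add_one]
    congr 1
    have hlen : w < (arr.drop j).length := by simp [List.length_drop]; omega
    rw [List.getElem?_eq_getElem hlen]
    simp only [Option.toList_some]
    congr 1
    rw [List.getElem_drop, List.getD_eq_getElem]
  rw [hTake, listMin_append_singleton]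
  apply List.ne_nil_of_length_pos
  rw [winList_length (by omega)]; omega

-- ---- gmax / lmin ----
theorem gmax_cases (Q : Nat → Bool) (i : Nat) :
    (gmax Q i = -1 ∧ ∀ j, j < i → Q j = false) ∨
    (∃ j, j < i ∧ Q j = true ∧ (∀ k, j < k → k < i → Q k = false) ∧ gmax Q i = (j : Int)) := by
  induction i with
  | zero => left; exact ⟨rfl, by omega⟩
  | succ n ih =>
    by_cases hQ : Q n
    · right
      exact ⟨n, by omega, hQ, by omega, by simp [gmax, hQ]⟩
    · rcases ih with ⟨h1, h2⟩ | ⟨j, hj1, hj2, hj3, hj4⟩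
      · left
        refine ⟨by simp [gmax, hQ, h1], ?_⟩
        intro j hj
        rcases Nat.lt_succ_iff_lt_or_eq.mp hj with h | rfl
        · exact h2 j h
        · simpa using hQ
      · right
        refine ⟨j, by omega, hj2, ?_, by simp [gmax, hQ, hj4]⟩
        intro k hk1 hk2
        rcases Nat.lt_succ_iff_lt_or_eq.mp hk2 with h | rfl
        · exact hj3 k hk1 h
        · simpa using hQ

theorem gmax_eq_of (Q : Nat → Bool) {i j : Nat} (hj : j < i) (hQ : Q j = true)
    (hab : ∀ k, j < k → k < i → Q k = false) : gmax Q i = (j : Int) := by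
  rcases gmax_cases Q i with ⟨_, h2⟩ | ⟨j', hj1, hj2, hj3, hj4⟩
  · rw [h2 j hj] at hQ; cases hQ
  · have : j = j' := by
      rcases Nat.lt_trichotomy j j' with h | h | h
      · rw [hab j' h hj1] at hj2; cases hj2
      · exact h
      · rw [hj3 j h hj] at hQ; cases hQ
    rw [this, hj4]

theorem gmax_eq_neg_one (Q : Nat → Bool) {i : Nat} (h : ∀ j, j < i → Q j = false) :
    gmax Q i = -1 := by
  rcases gmax_cases Q i with ⟨h1, _⟩ | ⟨j, hj1, hj2, _, _⟩
  · exact h1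
  · rw [h j hj1] at hj2; cases hj2

theorem gmax_bounds (Q : Nat → Bool) (i : Nat) : -1 ≤ gmax Q i ∧ gmax Q i < (i : Int) := by
  rcases gmax_cases Q i with ⟨h1, _⟩ | ⟨j, hj1, _, _, hj4⟩
  · omega
  · rw [hj4]; omega

theorem gmax_above_false (Q : Nat → Bool) {i k : Nat} (h1 : gmax Q i < (k : Int)) (h2 : k < i) :
    Q k = false := by
  rcases gmax_cases Q i with ⟨_, hall⟩ | ⟨j, hj1, _, hj3, hj4⟩
  · exact hall k h2
  · rw [hj4] at h1
    exact hj3 k (by exact_mod_cast h1) h2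

theorem gmax_lt_of (Q : Nat → Bool) {i j : Nat} (h : ∀ k, j ≤ k → k < i → Q k = false) :
    gmax Q i < (j : Int) ∨ gmax Q i = -1 := by
  rcases gmax_cases Q i with ⟨h1, _⟩ | ⟨j', hj1, hj2, _, hj4⟩
  · right; exact h1
  · left
    rw [hj4]
    by_contra hc
    have : j ≤ j' := by omega
    rw [h j' this hj1] at hj2; cases hj2

-- lmin: facts proved by induction on len = n - a
theorem lmin_cases (Q : Nat → Bool) (n a : Nat) (ha : a ≤ n) :
    (lmin Q n a = (n : Int) ∧ ∀ j, a ≤ j → j < n → Q j = false) ∨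
    (∃ j, a ≤ j ∧ j < n ∧ Q j = true ∧ (∀ k, a ≤ k → k < j → Q k = false) ∧ lmin Q n a = (j : Int)) := by
  obtain ⟨len, hlen⟩ : ∃ len, n = a + len := ⟨n - a, by omega⟩
  subst hlen
  clear ha
  induction len generalizing a with
  | zero => left; refine ⟨by rw [lmin]; simp, by omega⟩
  | succ m ih =>
    by_cases hQ : Q a
    · right
      refine ⟨a, le_refl a, by omega, hQ, by omega, ?_⟩
      rw [lmin]; simp [hQ]
    · have hrec : lmin Q (a + (m + 1)) a = lmin Q (a + (m + 1)) (a + 1) := by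
        rw [lmin]; simp [hQ]
      have ih' := ih (a + 1)
      rw [show a + 1 + m = a + (m + 1) by omega] at ih'
      rcases ih' with ⟨h1, h2⟩ | ⟨j, hj1, hj2, hj3, hj4, hj5⟩
      · left
        refine ⟨by rw [hrec, h1], ?_⟩
        intro j hja hjn
        rcases Nat.eq_or_lt_of_le hja with rfl | h
        · simpa using hQ
        · exact h2 j h hjn
      · right
        refine ⟨j, by omega, hj2, hj3, ?_, by rw [hrec, hj5]⟩
        intro k hk1 hk2
        rcases Nat.eq_or_lt_of_le hk1 with rfl | h
        · simpa using hQ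
        · exact hj4 k h hk2

theorem lmin_eq_of (Q : Nat → Bool) {n a j : Nat} (ha : a ≤ j) (hj : j < n) (hQ : Q j = true)
    (hab : ∀ k, a ≤ k → k < j → Q k = false) : lmin Q n a = (j : Int) := by
  rcases lmin_cases Q n a (by omega) with ⟨_, h2⟩ | ⟨j', hj1, hj2, hj3, hj4, hj5⟩
  · rw [h2 j ha hj] at hQ; cases hQ
  · have : j = j' := by
      rcases Nat.lt_trichotomy j j' with h | h | h
      · rw [hj4 j ha h] at hQ; cases hQ
      · exact h
      · rw [hab j' hj1 h] at hj3; cases hj3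
    rw [this, hj5]

theorem lmin_eq_n (Q : Nat → Bool) {n a : Nat} (ha : a ≤ n) (h : ∀ j, a ≤ j → j < n → Q j = false) :
    lmin Q n a = (n : Int) := by
  rcases lmin_cases Q n a ha with ⟨h1, _⟩ | ⟨j, hj1, hj2, hj3, _, _⟩
  · exact h1
  · rw [h j hj1 hj2] at hj3; cases hj3

theorem lmin_bounds (Q : Nat → Bool) {n a : Nat} (ha : a ≤ n) :
    (a : Int) ≤ lmin Q n a ∧ lmin Q n a ≤ (n : Int) := by
  rcases lmin_cases Q n a ha with ⟨h1, _⟩ | ⟨j, hj1, hj2, _, _, hj5⟩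
  · rw [h1]; constructor <;> omega
  · rw [hj5]; constructor <;> [exact_mod_cast hj1; omega]

theorem lmin_below_false (Q : Nat → Bool) {n a k : Nat} (ha : a ≤ n) (h1 : a ≤ k)
    (h2 : (k : Int) < lmin Q n a) : Q k = false := by
  rcases lmin_cases Q n a ha with ⟨hn, hall⟩ | ⟨j, hj1, hj2, _, hj4, hj5⟩
  · exact hall k h1 (by rw [hn] at h2; exact_mod_cast h2)
  · rw [hj5] at h2
    exact hj4 k h1 (by exact_mod_cast h2)

theorem lmin_ge_of (Q : Nat → Bool) {n a b : Nat} (hb : b ≤ n) (ha : a ≤ n)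
    (h : ∀ k, a ≤ k → k < b → Q k = false) : (b : Int) ≤ lmin Q n a := by
  rcases lmin_cases Q n a ha with ⟨h1, _⟩ | ⟨j, hj1, hj2, hj3, _, hj5⟩
  · rw [h1]; omega
  · rw [hj5]
    by_contra hc
    have : j < b := by omega
    rw [h j hj1 this] at hj3; cases hj3

-- ---- A's buggy running max (the `if not cur_max` fold) ----
theorem bfold_char : ∀ (l : List Int), l ≠ [] →
    ∃ r, l.foldl bstep none = some r ∧
      (listMax l ≠ 0 → r = listMax l) ∧
      (listMax l = 0 → (l.getLast? = some 0 → r = 0) ∧ ((∃ v, l.getLast? = some v ∧ v < 0) → r < 0)) := by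
  intro l
  induction l using List.reverseRecOn with
  | nil => intro h; exact absurd rfl h
  | append_singleton l v ih =>
    intro _
    rcases eq_or_ne l [] with rfl | hne
    · refine ⟨v, by simp [bstep], ?_⟩
      simp only [listMax, List.nil_append, List.getLast?_singleton]
      constructor
      · intro h
        simp [List.foldl]
      · intro h
        constructor
        · intro hv; simpa using hv
        · rintro ⟨v', hv', hlt⟩
          simp at hv'
          omega
    · obtain ⟨r, hr, h1, h2⟩ := ih hne
      have hfold : (l ++ [v]).foldl bstep none = bstep (some r) v := by
        rw [List.foldl_append, hr]; rfl
      have hmax : listMax (l ++ [v]) = max (listMax l) v := listMax_append_singleton v hne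
      have hlast : (l ++ [v]).getLast? = some v := by simp
      have hlastl : ∃ u, l.getLast? = some u := by
        cases hl : l.getLast? with
        | none => exact absurd (List.getLast?_eq_none_iff.mp hl) hne
        | some u => exact ⟨u, rfl⟩
      obtain ⟨u, hu⟩ := hlastl
      have hul : u ∈ l := List.mem_of_getLast? hu
      have hum : u ≤ listMax l := le_listMax hul
      by_cases hM : listMax l = 0
      · -- r is governed by h2
        have h2' := h2 hM
        rw [hmax, hM]
        by_cases huz : u = 0
        · have hr0 : r = 0 := h2'.1 (by rw [hu, huz])
          subst hr0
          refine ⟨v, by rw [hfold]; simp [bstep], ?_⟩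
          constructor
          · intro hmx
            rcases le_or_gt v 0 with h | h
            · omega
            · rw [max_eq_right (le_of_lt h)]
          · intro hmx
            refine ⟨?_, ?_⟩
            · intro hvz
              rw [hlast] at hvz
              simpa using hvz
            · rintro ⟨v', hv', hlt⟩
              rw [hlast] at hv'
              have hveq : v = v' := by injection hv'
              omega
        · have hrneg : r < 0 := h2'.2 ⟨u, hu, by omega⟩
          have hrnz : r ≠ 0 := by omega
          refine ⟨max r v, by rw [hfold]; simp [bstep, hrnz], ?_⟩
          constructor
          · intro hmx
            -- max 0 v ≠ 0 → v > 0, then max r v = v = max 0 v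
            rcases le_or_gt v 0 with h | h
            · rw [max_eq_left h] at hmx; omega
            · rw [max_eq_right (le_of_lt h)] at hmx ⊢
              omega
          · intro hmx
            refine ⟨?_, ?_⟩
            · intro hvz
              rw [hlast] at hvz
              have : v = 0 := by injection hvz
              omega
            · rintro ⟨v', hv', hlt⟩
              rw [hlast] at hv'
              have hveq : v = v' := by injection hv'
              omega
      · have hrM : r = listMax l := h1 hM
        have hrnz : r ≠ 0 := by rw [hrM]; exact hM
        refine ⟨max r v, by rw [hfold]; simp [bstep, hrnz], ?_⟩
        rw [hmax, hrM]
        constructor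
        · intro _; rfl
        · intro hmx
          -- max (listMax l) v = 0 with listMax l ≠ 0: listMax l < 0 and v = 0
          have hMlt : listMax l < 0 := by
            rcases lt_trichotomy (listMax l) 0 with h | h | h
            · exact h
            · exact absurd h hM
            · have := le_max_left (listMax l) v; omega
          have hvz : v = 0 := by
            have := le_max_right (listMax l) v
            rcases lt_trichotomy v 0 with h | h | h
            · rw [max_eq_left (by omega)] at hmx; omega
            · exact h
            · rw [max_eq_right (by omega)] at hmx; omega
          refine ⟨?_, ?_⟩
          · intro _
            rw [hvz]
            omega
          · rintro ⟨v', hv', hlt⟩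
            rw [hlast] at hv'
            have hveq : v = v' := by injection hv'
            omega

-- ---- getD/set helpers ----
theorem getD_set_lt {α} (l : List α) (i : Nat) (v d : α) (h : i < l.length) :
    (l.set i v).getD i d = v := by
  rw [List.getD_eq_getElem?_getD, List.getElem?_set_self (by omega)]
  rfl

theorem getD_set_ne {α} (l : List α) (i j : Nat) (v d : α) (h : i ≠ j) :
    (l.set i v).getD j d = l.getD j d := by
  rw [List.getD_eq_getElem?_getD, List.getElem?_set_ne h, ← List.getD_eq_getElem?_getD]


theorem innerA_partial (arr : List Int) (i : Nat) (cm : List Int) (hi : i < arr.length)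
    (hlen : cm.length = arr.length)
    (hcm : ∀ j, j + i ≤ arr.length → cm.getD j 0 = wmin arr (max i 1) j) :
    ∀ k, k ≤ arr.length - i →
      ∃ cm', (List.range k).foldl (innerStepA arr i) (cm, none) =
          (cm', ((List.range k).map (wmin arr (i+1))).foldl bstep none) ∧
        cm'.length = arr.length ∧
        (∀ j, j < k → cm'.getD j 0 = wmin arr (i+1) j) ∧
        (∀ j, k ≤ j → j + i ≤ arr.length → cm'.getD j 0 = wmin arr (max i 1) j) := by
  intro k
  induction k with
  | zero =>
    intro _
    exact ⟨cm, by simp, hlen, by omega, fun j _ hj => hcm j hj⟩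
  | succ m ih =>
    intro hk
    obtain ⟨cmm, hfold, hlen', hlow, hhigh⟩ := ih (by omega)
    have hread : cmm.getD m 0 = wmin arr (max i 1) m := hhigh m (le_refl m) (by omega)
    have hv : min (cmm.getD m 0) (arr.getD (m + i) 0) = wmin arr (i+1) m := by
      rw [hread]
      rcases Nat.eq_zero_or_pos i with rfl | hpos
      · rw [show (max 0 1 : Nat) = 1 by decide, Nat.add_zero, wmin_one (by omega)]
        exact min_self _
      · rw [Nat.max_eq_left hpos, ← wmin_succ hpos (by omega)]
    have hstep : innerStepA arr i (cmm, ((List.range m).map (wmin arr (i+1))).foldl bstep none) m =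
        (cmm.set m (wmin arr (i+1) m),
          bstep (((List.range m).map (wmin arr (i+1))).foldl bstep none) (wmin arr (i+1) m)) := by
      unfold innerStepA
      simp only []
      rw [hv]
    refine ⟨cmm.set m (wmin arr (i+1) m), ?_, by simpa using hlen', ?_, ?_⟩
    · rw [List.range_succ, List.foldl_append, hfold, List.map_append, List.foldl_append]
      simp only [List.foldl_cons, List.foldl_nil, List.map_cons, List.map_nil]
      exact hstep
    · intro j hj
      rcases Nat.lt_succ_iff_lt_or_eq.mp hj with h | rfl
      · rw [getD_set_ne _ _ _ _ _ (by omega), hlow j h]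
      · rw [getD_set_lt _ _ _ _ (by omega)]
    · intro j hj hji
      rw [getD_set_ne _ _ _ _ _ (by omega), hhigh j (by omega) hji]

theorem innerA_spec (arr : List Int) (i : Nat) (cm : List Int) (hi : i < arr.length)
    (hlen : cm.length = arr.length)
    (hcm : ∀ j, j + i ≤ arr.length → cm.getD j 0 = wmin arr (max i 1) j) :
    ∃ cm', (List.range (arr.length - i)).foldl (innerStepA arr i) (cm, none) =
        (cm', (minsL arr (i+1)).foldl bstep none) ∧
      cm'.length = arr.length ∧
      (∀ j, j + (i+1) ≤ arr.length → cm'.getD j 0 = wmin arr (i+1) j) := by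
  obtain ⟨cm', hfold, hlen', hlow, _⟩ :=
    innerA_partial arr i cm hi hlen hcm (arr.length - i) (le_refl _)
  refine ⟨cm', ?_, hlen', fun j hj => hlow j (by omega)⟩
  have hm : minsL arr (i+1) = (List.range (arr.length - i)).map (wmin arr (i+1)) := by
    unfold minsL
    congr 2
    omega
  rw [hm]
  exact hfold

theorem riddle_A_eval : ∀ (arr : List Int),
    riddle arr = (List.range arr.length).map
      (fun i => (((minsL arr (i+1)).foldl bstep none).getD 0)) := by
  intro arr
  suffices h : ∀ i, i ≤ arr.length →
      ∃ cm, (List.range i).foldl (outerStepA arr) (arr, []) =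
          (cm, (List.range i).map (fun t => (((minsL arr (t+1)).foldl bstep none).getD 0))) ∧
        cm.length = arr.length ∧
        (∀ j, j + i ≤ arr.length → cm.getD j 0 = wmin arr (max i 1) j) by
    obtain ⟨cm, hfold, _, _⟩ := h arr.length (le_refl _)
    unfold riddle
    rw [hfold]
  intro i
  induction i with
  | zero =>
    intro _
    refine ⟨arr, by simp, rfl, ?_⟩
    intro j hj
    rcases Nat.lt_or_ge j arr.length with h | h
    · rw [show (max 0 1 : Nat) = 1 by decide, wmin_one h]
    · have hj' : j = arr.length := by omega
      subst hj'
      rw [List.getD_eq_default _ _ (le_refl _)]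
      unfold wmin
      rw [List.drop_of_length_le (le_refl _)]
      rfl
  | succ m ih =>
    intro hi
    obtain ⟨cm, hfold, hlen, hcm⟩ := ih (by omega)
    obtain ⟨cm', hinner, hlen', hlow⟩ := innerA_spec arr m cm (by omega) hlen hcm
    refine ⟨cm', ?_, hlen', ?_⟩
    · rw [List.range_succ, List.foldl_append, hfold, List.map_append]
      simp only [List.foldl_cons, List.foldl_nil, List.map_cons, List.map_nil]
      unfold outerStepA
      rw [hinner]
    · intro j hj
      rw [hlow j (by omega)]
      congr 1
      omega

-- ---- B-side: the monotonic stacks ----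
theorem bool_eq_of_iff {a b : Bool} (h : a = true ↔ b = true) : a = b := by
  cases a <;> cases b <;> simp_all

def visL (arr : List Int) (i j : Nat) : Bool :=
  (List.range i).all (fun k => !decide (j < k) || decide (arr.getD j 0 < arr.getD k 0))

theorem visL_iff (arr : List Int) (i j : Nat) :
    visL arr i j = true ↔ ∀ k, k < i → j < k → arr.getD j 0 < arr.getD k 0 := by
  unfold visL
  rw [List.all_eq_true]
  constructor
  · intro h k hk hjk
    have := h k (List.mem_range.mpr hk)
    simp only [hjk, decide_true, Bool.not_true, Bool.false_or, decide_eq_true_eq] at this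
    exact this
  · intro h k hk
    by_cases hjk : j < k
    · simp only [hjk, decide_true, Bool.not_true, Bool.false_or, decide_eq_true_eq]
      exact h k (List.mem_range.mp hk) hjk
    · simp only [hjk, decide_false, Bool.not_false, Bool.true_or]

def stackL (arr : List Int) (i : Nat) : List Nat := ((List.range i).filter (visL arr i)).reverse

theorem popGE_eq_dropWhile (arr : List Int) (v : Int) :
    ∀ s : List Nat, popGE arr v s = s.dropWhile (fun t => decide (v ≤ arr.getD t 0)) := by
  intro s
  induction s with
  | nil => rfl
  | cons t r ih =>
    rw [List.dropWhile_cons]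
    by_cases h : v ≤ arr.getD t 0
    · rw [if_pos (by simpa using h)]
      unfold popGE
      rw [if_pos h, ih]
    · rw [if_neg (by simpa using h)]
      unfold popGE
      rw [if_neg h]

theorem dropWhile_eq_filter_of_chain {α} (p : α → Bool) :
    ∀ l : List α, l.Pairwise (fun a b => p b = true → p a = true) →
      l.dropWhile p = l.filter (fun x => !p x) := by
  intro l h
  induction l with
  | nil => rfl
  | cons x xs ih =>
    rw [List.pairwise_cons] at h
    by_cases hx : p x
    · rw [List.dropWhile_cons, if_pos hx, List.filter_cons, if_neg (by simp [hx]), ih h.2]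
    · have hx' : p x = false := by simpa using hx
      rw [List.dropWhile_cons, if_neg (by simp [hx']), List.filter_cons, if_pos (by simp [hx'])]
      congr 1
      refine (List.filter_eq_self.mpr ?_).symm
      intro a ha
      have hpa : p a = false := by
        by_cases hc : p a
        · exact absurd (h.1 a ha hc) hx
        · simpa using hc
      simp [hpa]

theorem stackL_pairwise (arr : List Int) (i : Nat) :
    (stackL arr i).Pairwise (fun a b => arr.getD b 0 < arr.getD a 0) := by
  unfold stackL
  rw [List.pairwise_reverse]
  have hp : ((List.range i).filter (visL arr i)).Pairwise (· < ·) :=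
    List.Pairwise.sublist List.filter_sublist List.pairwise_lt_range
  apply List.Pairwise.imp_of_mem ?_ hp
  intro a b ha hb hab
  have hva := (List.mem_filter.mp ha).2
  have hbr := List.mem_range.mp (List.mem_filter.mp hb).1
  exact (visL_iff arr i a).mp hva b hbr hab

theorem popGE_stackL (arr : List Int) (i : Nat) (v : Int) :
    popGE arr v (stackL arr i) =
      ((List.range i).filter (fun j => visL arr i j && decide (arr.getD j 0 < v))).reverse := by
  rw [popGE_eq_dropWhile, dropWhile_eq_filter_of_chain _ _ ?pw]
  case pw =>
    apply (stackL_pairwise arr i).imp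
    intro a b hab h
    simp only [decide_eq_true_eq] at h ⊢
    omega
  · unfold stackL
    rw [List.filter_reverse, List.filter_filter]
    refine congrArg List.reverse ?_
    apply List.filter_congr
    intro j _
    by_cases h : arr.getD j 0 < v
    · rw [decide_eq_true h, decide_eq_false (by omega : ¬ v ≤ arr.getD j 0)]
      simp
    · rw [decide_eq_false h, decide_eq_true (by omega : v ≤ arr.getD j 0)]
      simp

theorem stackL_succ (arr : List Int) (i : Nat) :
    stackL arr (i + 1) = i :: popGE arr (arr.getD i 0) (stackL arr i) := by
  rw [popGE_stackL]
  unfold stackL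
  rw [List.range_succ, List.filter_append]
  have hvi : visL arr (i+1) i = true := by
    rw [visL_iff]
    intro k hk hik
    omega
  have hsingle : [i].filter (visL arr (i+1)) = [i] := by simp [hvi]
  rw [hsingle, List.reverse_append]
  simp only [List.reverse_cons, List.reverse_nil, List.nil_append, List.cons_append]
  congr 2
  apply List.filter_congr
  intro j hj
  have hji : j < i := List.mem_range.mp hj
  apply bool_eq_of_iff
  rw [visL_iff, Bool.and_eq_true, visL_iff, decide_eq_true_eq]
  constructor
  · intro h
    exact ⟨fun k hk hjk => h k (by omega) hjk, h i (by omega) hji⟩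
  · rintro ⟨h1, h2⟩ k hk hjk
    rcases Nat.lt_succ_iff_lt_or_eq.mp hk with h | rfl
    · exact h1 k h hjk
    · exact h2

theorem topD_filter_range (Q : Nat → Bool) (i : Nat) :
    topD ((List.range i).filter Q).reverse (-1) = gmax Q i := by
  induction i with
  | zero => rfl
  | succ n ih =>
    rw [List.range_succ, List.filter_append]
    by_cases h : Q n
    · rw [show List.filter Q [n] = [n] from by simp [h], List.reverse_append]
      show (n : Int) = gmax Q (n + 1)
      rw [gmax, if_pos h]
    · rw [show List.filter Q [n] = [] from by simp [h], List.append_nil, ih, gmax, if_neg h]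

theorem stack_top_nsl (arr : List Int) (i : Nat) :
    topD (popGE arr (arr.getD i 0) (stackL arr i)) (-1) = nsl arr i := by
  rw [popGE_stackL, topD_filter_range]
  unfold nsl
  rcases gmax_cases (fun j => decide (arr.getD j 0 < arr.getD i 0)) i with
    ⟨h1, h2⟩ | ⟨j, hj1, hj2, hj3, hj4⟩
  · rw [h1]
    apply gmax_eq_neg_one
    intro k hk
    show (visL arr i k && decide (arr.getD k 0 < arr.getD i 0)) = false
    rw [h2 k hk, Bool.and_false]
  · rw [hj4]
    apply gmax_eq_of _ hj1
    · show (visL arr i j && decide (arr.getD j 0 < arr.getD i 0)) = true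
      rw [Bool.and_eq_true]
      refine ⟨?_, hj2⟩
      rw [visL_iff]
      intro k hk hjk
      have hk2 := hj3 k hjk hk
      simp only [decide_eq_false_iff_not, not_lt] at hk2
      simp only [decide_eq_true_eq] at hj2
      omega
    · intro k hk1 hk2
      show (visL arr i k && decide (arr.getD k 0 < arr.getD i 0)) = false
      rw [hj3 k hk1 hk2, Bool.and_false]

theorem leftPass (arr : List Int) : ∀ i, i ≤ arr.length →
    ∃ lft, (List.range i).foldl (leftStep arr) (List.replicate arr.length (-1), []) = (lft, stackL arr i) ∧
      lft.length = arr.length ∧ ∀ j, j < i → lft.getD j 0 = nsl arr j := by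
  intro i
  induction i with
  | zero =>
    intro _
    exact ⟨List.replicate arr.length (-1), by simp [stackL], by simp, by omega⟩
  | succ m ih =>
    intro hi
    obtain ⟨lft, hfold, hlen, hlow⟩ := ih (by omega)
    refine ⟨lft.set m (nsl arr m), ?_, by simpa using hlen, ?_⟩
    · rw [List.range_succ, List.foldl_append, hfold]
      simp only [List.foldl_cons, List.foldl_nil, leftStep]
      rw [stack_top_nsl arr m, ← stackL_succ arr m]
    · intro j hj
      rcases Nat.lt_succ_iff_lt_or_eq.mp hj with h | rfl
      · rw [getD_set_ne _ _ _ _ _ (by omega), hlow j h]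
      · rw [getD_set_lt _ _ _ _ (by omega)]
-- right-to-left stack
def visR (arr : List Int) (t j : Nat) : Bool :=
  (List.range j).all (fun k => !decide (t ≤ k) || decide (arr.getD j 0 < arr.getD k 0))

theorem visR_iff (arr : List Int) (t j : Nat) :
    visR arr t j = true ↔ ∀ k, k < j → t ≤ k → arr.getD j 0 < arr.getD k 0 := by
  unfold visR
  rw [List.all_eq_true]
  constructor
  · intro h k hk htk
    have := h k (List.mem_range.mpr hk)
    simp only [htk, decide_true, Bool.not_true, Bool.false_or, decide_eq_true_eq] at this
    exact this
  · intro h k hk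
    by_cases htk : t ≤ k
    · simp only [htk, decide_true, Bool.not_true, Bool.false_or, decide_eq_true_eq]
      exact h k (List.mem_range.mp hk) htk
    · simp only [htk, decide_false, Bool.not_false, Bool.true_or]

def stackR (arr : List Int) (t : Nat) : List Nat :=
  (List.range' t (arr.length - t)).filter (visR arr t)

theorem stackR_pairwise (arr : List Int) (t : Nat) :
    (stackR arr t).Pairwise (fun a b => arr.getD b 0 < arr.getD a 0) := by
  unfold stackR
  have hp : ((List.range' t (arr.length - t)).filter (visR arr t)).Pairwise (· < ·) :=
    List.Pairwise.sublist List.filter_sublist (List.pairwise_lt_range' 1)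
  apply List.Pairwise.imp_of_mem ?_ hp
  intro a b ha hb hab
  have hvb := (List.mem_filter.mp hb).2
  have har := List.mem_range'_1.mp (List.mem_filter.mp ha).1
  exact (visR_iff arr t b).mp hvb a hab har.1

theorem popGE_stackR (arr : List Int) (t : Nat) (v : Int) :
    popGE arr v (stackR arr t) =
      (List.range' t (arr.length - t)).filter (fun j => visR arr t j && decide (arr.getD j 0 < v)) := by
  rw [popGE_eq_dropWhile, dropWhile_eq_filter_of_chain _ _ ?pw]
  case pw =>
    apply (stackR_pairwise arr t).imp
    intro a b hab h
    simp only [decide_eq_true_eq] at h ⊢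
    omega
  · unfold stackR
    rw [List.filter_filter]
    apply List.filter_congr
    intro j _
    by_cases h : arr.getD j 0 < v
    · rw [decide_eq_true h, decide_eq_false (by omega : ¬ v ≤ arr.getD j 0)]
      simp
    · rw [decide_eq_false h, decide_eq_true (by omega : v ≤ arr.getD j 0)]
      simp

theorem stackR_step (arr : List Int) (t : Nat) (ht : t < arr.length) :
    stackR arr t = t :: popGE arr (arr.getD t 0) (stackR arr (t + 1)) := by
  rw [popGE_stackR]
  unfold stackR
  obtain ⟨m, hm⟩ : ∃ m, arr.length - t = m + 1 := ⟨arr.length - t - 1, by omega⟩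
  rw [hm, List.range'_succ]
  have hvt : visR arr t t = true := by
    rw [visR_iff]; intro k hk htk; omega
  rw [List.filter_cons, if_pos (by simp [hvt])]
  congr 1
  have hlen : arr.length - (t + 1) = m := by omega
  rw [hlen]
  apply List.filter_congr
  intro j hj
  have hji := List.mem_range'_1.mp hj
  apply bool_eq_of_iff
  rw [visR_iff, Bool.and_eq_true, visR_iff, decide_eq_true_eq]
  constructor
  · intro h
    exact ⟨fun k hk htk => h k hk (by omega), h t (by omega) (by omega)⟩
  · rintro ⟨h1, h2⟩ k hk htk
    rcases Nat.eq_or_lt_of_le htk with rfl | hlt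
    · exact h2
    · exact h1 k hk (by omega)

theorem topD_filter_range' (Q : Nat → Bool) : ∀ (len a : Nat),
    topD ((List.range' a len).filter Q) ((a + len : Nat) : Int) = lmin Q (a + len) a := by
  intro len
  induction len with
  | zero =>
    intro a
    rw [lmin]
    simp [topD]
  | succ m ih =>
    intro a
    rw [List.range'_succ, List.filter_cons]
    by_cases h : Q a
    · rw [if_pos h, lmin, dif_pos (by omega : a < a + (m + 1)), if_pos h]
      rfl
    · rw [if_neg h, lmin, dif_pos (by omega : a < a + (m + 1)), if_neg h]
      have := ih (a + 1)
      rw [show a + 1 + m = a + (m + 1) by omega] at this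
      exact this

theorem stack_top_nsr (arr : List Int) (i : Nat) (hi : i < arr.length) :
    topD (popGE arr (arr.getD i 0) (stackR arr (i + 1))) (arr.length : Int) = nsr arr i := by
  rw [popGE_stackR]
  have hsum : (i + 1) + (arr.length - (i + 1)) = arr.length := by omega
  have hh := topD_filter_range' (fun j => visR arr (i + 1) j && decide (arr.getD j 0 < arr.getD i 0))
    (arr.length - (i + 1)) (i + 1)
  rw [hsum] at hh
  rw [hh]
  unfold nsr
  rcases lmin_cases (fun j => decide (arr.getD j 0 < arr.getD i 0)) arr.length (i + 1) (by omega)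
    with ⟨h1, h2⟩ | ⟨j, hj1, hj2, hj3, hj4, hj5⟩
  · rw [h1]
    apply lmin_eq_n _ (by omega)
    intro k hk1 hk2
    show (visR arr (i + 1) k && decide (arr.getD k 0 < arr.getD i 0)) = false
    rw [h2 k hk1 hk2, Bool.and_false]
  · rw [hj5]
    apply lmin_eq_of _ hj1 hj2
    · show (visR arr (i + 1) j && decide (arr.getD j 0 < arr.getD i 0)) = true
      rw [Bool.and_eq_true]
      refine ⟨?_, hj3⟩
      rw [visR_iff]
      intro k hk hik
      have hk2 := hj4 k hik hk
      simp only [decide_eq_false_iff_not, not_lt] at hk2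
      simp only [decide_eq_true_eq] at hj3
      omega
    · intro k hk1 hk2
      show (visR arr (i + 1) k && decide (arr.getD k 0 < arr.getD i 0)) = false
      rw [hj4 k hk1 hk2, Bool.and_false]

theorem rightPass (arr : List Int) : ∀ m, m ≤ arr.length →
    ∃ rgt, ((List.range' (arr.length - m) m).reverse).foldl (rightStep arr)
        (List.replicate arr.length (arr.length : Int), []) = (rgt, stackR arr (arr.length - m)) ∧
      rgt.length = arr.length ∧
      ∀ j, arr.length - m ≤ j → j < arr.length → rgt.getD j 0 = nsr arr j := by
  intro m
  induction m with
  | zero =>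
    intro _
    refine ⟨List.replicate arr.length (arr.length : Int), ?_, by simp, by omega⟩
    simp [stackR]
  | succ k ih =>
    intro hm
    obtain ⟨rgt, hfold, hlen, hhigh⟩ := ih (by omega)
    set t := arr.length - (k + 1) with hts
    have htk : arr.length - k = t + 1 := by omega
    have htlt : t < arr.length := by omega
    have hfold2 : ((List.range' (t + 1) k).reverse).foldl (rightStep arr)
        (List.replicate arr.length (arr.length : Int), []) = (rgt, stackR arr (t + 1)) := by
      rw [← htk]
      exact hfold
    refine ⟨rgt.set t (nsr arr t), ?_, by simpa using hlen, ?_⟩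
    · have hrange : List.range' t (k + 1) = t :: List.range' (t + 1) k := List.range'_succ
      rw [hrange]
      simp only [List.reverse_cons]
      rw [List.foldl_append, hfold2]
      simp only [List.foldl_cons, List.foldl_nil, rightStep]
      rw [stack_top_nsr arr t htlt, ← stackR_step arr t htlt]
    · intro j hj1 hj2
      rcases Nat.eq_or_lt_of_le hj1 with rfl | h
      · rw [getD_set_lt _ _ _ _ (by omega)]
      · rw [getD_set_ne _ _ _ _ _ (by omega), hhigh j (by omega) hj2]
-- ---- best[] / suffix-max phases ----
def IsOMax (arr : List Int) (cond : Nat → Prop) : Option Int → Prop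
  | none => ∀ t, ¬ cond t
  | some c => (∃ t, cond t ∧ arr.getD t 0 = c) ∧ ∀ t, cond t → arr.getD t 0 ≤ c

theorem IsOMax_unique {arr : List Int} {cond : Nat → Prop} {o1 o2 : Option Int}
    (h1 : IsOMax arr cond o1) (h2 : IsOMax arr cond o2) : o1 = o2 := by
  cases o1 with
  | none =>
    cases o2 with
    | none => rfl
    | some c =>
      obtain ⟨⟨t, ht, _⟩, _⟩ := h2
      exact absurd ht (h1 t)
  | some c =>
    cases o2 with
    | none =>
      obtain ⟨⟨t, ht, _⟩, _⟩ := h1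
      exact absurd ht (h2 t)
    | some c' =>
      obtain ⟨⟨t, ht, htv⟩, hle⟩ := h1
      obtain ⟨⟨t', ht', htv'⟩, hle'⟩ := h2
      have a1 : c ≤ c' := htv ▸ hle' t ht
      have a2 : c' ≤ c := htv' ▸ hle t' ht'
      rw [le_antisymm a1 a2]

theorem IsOMax_congr {arr : List Int} {c1 c2 : Nat → Prop} {o : Option Int}
    (h : ∀ t, c1 t ↔ c2 t) (ho : IsOMax arr c1 o) : IsOMax arr c2 o := by
  cases o with
  | none => exact fun t ht => ho t ((h t).mpr ht)
  | some c =>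
    obtain ⟨⟨t, ht, htv⟩, hle⟩ := ho
    exact ⟨⟨t, (h t).mp ht, htv⟩, fun t' ht' => hle t' ((h t').mpr ht')⟩

theorem spanN_facts (arr : List Int) (i : Nat) (hi : i < arr.length) :
    1 ≤ spanN arr i ∧ spanN arr i ≤ arr.length ∧
      (spanN arr i : Int) = nsr arr i - nsl arr i - 1 ∧
      -1 ≤ nsl arr i ∧ nsl arr i < (i : Int) ∧
      ((i : Int)) < nsr arr i ∧ nsr arr i ≤ (arr.length : Int) := by
  have hg := gmax_bounds (fun j => decide (arr.getD j 0 < arr.getD i 0)) i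
  have hl := lmin_bounds (fun j => decide (arr.getD j 0 < arr.getD i 0))
    (n := arr.length) (a := i + 1) (by omega)
  unfold spanN nsl nsr at *
  push_cast at *
  omega

theorem bestPass (arr lft rgt : List Int)
    (hl : ∀ j, j < arr.length → lft.getD j 0 = nsl arr j)
    (hr : ∀ j, j < arr.length → rgt.getD j 0 = nsr arr j) :
    ∀ i, i ≤ arr.length →
      ((List.range i).foldl (bestStep arr lft rgt) (List.replicate (arr.length + 1) none)).length
          = arr.length + 1 ∧
      ∀ w, w ≤ arr.length →
        IsOMax arr (fun t => t < i ∧ spanN arr t = w)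
          (((List.range i).foldl (bestStep arr lft rgt) (List.replicate (arr.length + 1) none)).getD w none) := by
  intro i
  induction i with
  | zero =>
    intro _
    refine ⟨by simp, ?_⟩
    intro w hw
    have hrep : (List.replicate (arr.length + 1) (none : Option Int)).getD w none = none := by
      rcases Nat.lt_or_ge w (arr.length + 1) with h | h
      · rw [List.getD_eq_getElem _ _ (by simpa using h), List.getElem_replicate]
      · rw [List.getD_eq_default _ _ (by simpa using h)]
    simp only [List.range_zero, List.foldl_nil, hrep]
    exact fun t ht => absurd ht.1 (Nat.not_lt_zero t)
  | succ m ih =>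
    intro hi
    obtain ⟨hlen, hchar⟩ := ih (by omega)
    rw [List.range_succ, List.foldl_append]
    simp only [List.foldl_cons, List.foldl_nil]
    set b := (List.range m).foldl (bestStep arr lft rgt) (List.replicate (arr.length + 1) none) with hb
    have hm : m < arr.length := by omega
    have hspan := spanN_facts arr m hm
    have hwm : (rgt.getD m 0 - lft.getD m 0 - 1).toNat = spanN arr m := by
      rw [hl m hm, hr m hm]; rfl
    have hwlt : spanN arr m < b.length := by omega
    -- the three branches of bestStep
    have hbranch : ∀ (bb : List (Option Int)), bb = bestStep arr lft rgt b m →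
        (bb = b.set (spanN arr m) (some (arr.getD m 0)) ∧
          (b.getD (spanN arr m) none = none ∨
           ∃ mv, b.getD (spanN arr m) none = some mv ∧ arr.getD m 0 > mv)) ∨
        (bb = b ∧ ∃ mv, b.getD (spanN arr m) none = some mv ∧ ¬ arr.getD m 0 > mv) := by
      intro bb hbb
      unfold bestStep at hbb
      rw [hwm] at hbb
      cases hcase : b.getD (spanN arr m) none with
      | none =>
        left
        rw [hcase] at hbb
        exact ⟨hbb, Or.inl rfl⟩
      | some mv =>
        have hbb' : bb = if arr.getD m 0 > mv then
            b.set (spanN arr m) (some (arr.getD m 0)) else b := by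
          rw [hcase] at hbb
          exact hbb
        by_cases hgt : arr.getD m 0 > mv
        · left
          rw [if_pos hgt] at hbb'
          exact ⟨hbb', Or.inr ⟨mv, rfl, hgt⟩⟩
        · right
          rw [if_neg hgt] at hbb'
          exact ⟨hbb', mv, rfl, hgt⟩
    rcases hbranch _ rfl with ⟨hbb, hval⟩ | ⟨hbb, mv, hmv, hng⟩
    · rw [hbb]
      refine ⟨by simpa using hlen, ?_⟩
      intro w hw
      by_cases hweq : w = spanN arr m
      · subst hweq
        rw [getD_set_lt _ _ _ _ hwlt]
        rcases hval with hnone | ⟨mv, hmv, hgt⟩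
        · have hold := hchar _ hw
          rw [hnone] at hold
          refine ⟨⟨m, ⟨by omega, rfl⟩, rfl⟩, ?_⟩
          rintro t ⟨ht1, ht2⟩
          rcases Nat.lt_succ_iff_lt_or_eq.mp ht1 with h | rfl
          · exact absurd ⟨h, ht2⟩ (hold t)
          · exact le_refl _
        · have hold := hchar _ hw
          rw [hmv] at hold
          obtain ⟨_, hle⟩ := hold
          refine ⟨⟨m, ⟨by omega, rfl⟩, rfl⟩, ?_⟩
          rintro t ⟨ht1, ht2⟩
          rcases Nat.lt_succ_iff_lt_or_eq.mp ht1 with h | rfl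
          · exact le_trans (hle t ⟨h, ht2⟩) (by omega)
          · exact le_refl _
      · rw [getD_set_ne _ _ _ _ _ (fun hc => hweq hc.symm)]
        have hiff : ∀ t, (t < m ∧ spanN arr t = w) ↔ (t < m + 1 ∧ spanN arr t = w) := by
          intro t
          constructor
          · rintro ⟨h1, h2⟩; exact ⟨by omega, h2⟩
          · rintro ⟨h1, h2⟩
            rcases Nat.lt_succ_iff_lt_or_eq.mp h1 with h | rfl
            · exact ⟨h, h2⟩
            · exact absurd h2 (fun hc => hweq hc.symm)
        exact IsOMax_congr hiff (hchar w hw)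
    · rw [hbb]
      refine ⟨hlen, ?_⟩
      intro w hw
      by_cases hweq : w = spanN arr m
      · subst hweq
        have hold := hchar _ hw
        rw [hmv] at hold ⊢
        obtain ⟨⟨t0, ht0, ht0v⟩, hle⟩ := hold
        refine ⟨⟨t0, ⟨by omega, ht0.2⟩, ht0v⟩, ?_⟩
        rintro t ⟨ht1, ht2⟩
        rcases Nat.lt_succ_iff_lt_or_eq.mp ht1 with h | rfl
        · exact hle t ⟨h, ht2⟩
        · omega
      · have hiff : ∀ t, (t < m ∧ spanN arr t = w) ↔ (t < m + 1 ∧ spanN arr t = w) := by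
          intro t
          constructor
          · rintro ⟨h1, h2⟩; exact ⟨by omega, h2⟩
          · rintro ⟨h1, h2⟩
            rcases Nat.lt_succ_iff_lt_or_eq.mp h1 with h | rfl
            · exact ⟨h, h2⟩
            · exact absurd h2 (fun hc => hweq hc.symm)
        exact IsOMax_congr hiff (hchar w hw)
-- ---- window-minimum mathematics ----
theorem spanN_ge (arr : List Int) {w j s : Nat} (hw : 1 ≤ w) (hjw : j + w ≤ arr.length)
    (hs1 : j ≤ s) (hs2 : s < j + w)
    (hmin : ∀ k, j ≤ k → k < j + w → arr.getD s 0 ≤ arr.getD k 0) : w ≤ spanN arr s := by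
  have hsn : s < arr.length := by omega
  have hf := spanN_facts arr s hsn
  have hnsl : nsl arr s < (j : Int) := by
    have := gmax_lt_of (fun k => decide (arr.getD k 0 < arr.getD s 0)) (i := s) (j := j) ?_
    · unfold nsl
      rcases this with h | h
      · exact h
      · rw [h]; omega
    · intro k hk1 hk2
      simp only [decide_eq_false_iff_not, not_lt]
      exact hmin k hk1 (by omega)
  have hnsr : ((j + w : Nat) : Int) ≤ nsr arr s := by
    unfold nsr
    apply lmin_ge_of _ (by omega) (by omega)
    intro k hk1 hk2
    simp only [decide_eq_false_iff_not, not_lt]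
    exact hmin k (by omega) (by omega)
  push_cast at hnsr
  omega

theorem mem_minsL {arr : List Int} {w : Nat} {x : Int} :
    x ∈ minsL arr w ↔ ∃ j, j < arr.length - w + 1 ∧ wmin arr w j = x := by
  unfold minsL
  simp [List.mem_map, List.mem_range]

theorem minsL_ne_nil (arr : List Int) (w : Nat) : minsL arr w ≠ [] := by
  apply List.ne_nil_of_length_pos
  unfold minsL
  simp

theorem arr_le_of_span (arr : List Int) {s w : Nat} (hs : s < arr.length) (hw : 1 ≤ w)
    (hspan : w ≤ spanN arr s) : arr.getD s 0 ≤ trueAns arr w := by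
  obtain ⟨h1, h2, h3, h4, h5, h6, h7⟩ := spanN_facts arr s hs
  set L := nsl arr s with hL
  set R := nsr arr s with hR
  have hspan' : (w : Int) ≤ R - L - 1 := by omega
  have hbetween : ∀ k : Nat, L < (k : Int) → (k : Int) < R → arr.getD s 0 ≤ arr.getD k 0 := by
    intro k hk1 hk2
    rcases Nat.lt_trichotomy k s with h | rfl | h
    · have := gmax_above_false (fun j => decide (arr.getD j 0 < arr.getD s 0)) (i := s) (k := k) hk1 h
      simp only [decide_eq_false_iff_not, not_lt] at this
      exact this
    · exact le_refl _
    · have := lmin_below_false (fun j => decide (arr.getD j 0 < arr.getD s 0))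
        (n := arr.length) (a := s + 1) (by omega) (by omega) hk2
      simp only [decide_eq_false_iff_not, not_lt] at this
      exact this
  -- choose a size-w window inside (L, R) containing s
  have hj0 : ∃ j0 : Nat, (L < (j0 : Int)) ∧ j0 ≤ s ∧ s < j0 + w ∧ j0 + w ≤ arr.length ∧
      ((j0 : Int) + w ≤ R) := by
    by_cases hcase : (s : Int) + w ≤ R
    · exact ⟨s, by omega, le_refl s, by omega, by push_cast at hcase ⊢; omega, by push_cast at hcase ⊢; omega⟩
    · refine ⟨(R - w).toNat, ?_, ?_, ?_, ?_, ?_⟩ <;> push_cast at hcase ⊢ <;> omega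
  obtain ⟨j0, hb1, hb2, hb3, hb4, hb5⟩ := hj0
  have heq : wmin arr w j0 = arr.getD s 0 := by
    apply le_antisymm
    · exact wmin_le hb4 hb2 hb3
    · obtain ⟨k0, hk1, hk2, hk3⟩ := wmin_mem hb4 hw
      rw [← hk3]
      apply hbetween k0 (by push_cast; omega) (by push_cast at hb5 ⊢; omega)
  rw [← heq]
  apply le_listMax
  rw [mem_minsL]
  exact ⟨j0, by omega, rfl⟩

theorem trueAns_isOMax (arr : List Int) (w : Nat) (hw1 : 1 ≤ w) (hwn : w ≤ arr.length) :
    IsOMax arr (fun s => s < arr.length ∧ w ≤ spanN arr s) (some (trueAns arr w)) := by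
  constructor
  · -- the maximum is attained at a minimal element of some window, whose span covers w
    have hmem := listMax_mem (minsL_ne_nil arr w)
    rw [mem_minsL] at hmem
    obtain ⟨j, hj, hjv⟩ := hmem
    have hjw : j + w ≤ arr.length := by omega
    obtain ⟨s, hs1, hs2, hs3⟩ := wmin_mem hjw hw1
    refine ⟨s, ⟨by omega, ?_⟩, by rw [hs3, hjv]; rfl⟩
    apply spanN_ge arr hw1 hjw hs1 hs2
    intro k hk1 hk2
    rw [hs3]
    exact wmin_le hjw hk1 hk2
  · rintro s ⟨hs1, hs2⟩
    exact arr_le_of_span arr hs1 hw1 hs2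

-- ---- final suffix-max pass ----
theorem IsOMax_combine {arr : List Int} {c1 c2 : Nat → Prop} {o1 o2 : Option Int}
    (h1 : IsOMax arr c1 o1) (h2 : IsOMax arr c2 o2) :
    IsOMax arr (fun t => c1 t ∨ c2 t) (omaxC o1 o2) := by
  cases o1 with
  | none =>
    cases o2 with
    | none =>
      rintro t (ht | ht)
      exacts [h1 t ht, h2 t ht]
    | some c =>
      obtain ⟨⟨t0, ht0, ht0v⟩, hle⟩ := h2
      refine ⟨⟨t0, Or.inr ht0, ht0v⟩, ?_⟩
      rintro t (ht | ht)
      exacts [absurd ht (h1 t), hle t ht]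
  | some bv =>
    obtain ⟨⟨t1, ht1, ht1v⟩, hle1⟩ := h1
    cases o2 with
    | none =>
      refine ⟨⟨t1, Or.inl ht1, ht1v⟩, ?_⟩
      rintro t (ht | ht)
      exacts [hle1 t ht, absurd ht (h2 t)]
    | some c =>
      obtain ⟨⟨t2, ht2, ht2v⟩, hle2⟩ := h2
      by_cases hgt : bv > c
      · show IsOMax arr _ (if bv > c then some bv else some c)
        rw [if_pos hgt]
        refine ⟨⟨t1, Or.inl ht1, ht1v⟩, ?_⟩
        rintro t (ht | ht)
        exacts [hle1 t ht, le_trans (hle2 t ht) (by omega)]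
      · show IsOMax arr _ (if bv > c then some bv else some c)
        rw [if_neg hgt]
        refine ⟨⟨t2, Or.inr ht2, ht2v⟩, ?_⟩
        rintro t (ht | ht)
        exacts [le_trans (hle1 t ht) (by omega), hle2 t ht]

theorem resPass (arr : List Int) (b : List (Option Int))
    (hb : ∀ w, w ≤ arr.length →
      IsOMax arr (fun t => t < arr.length ∧ spanN arr t = w) (b.getD w none)) :
    ∀ m, m ≤ arr.length →
      ∃ res cur, ((List.range' (arr.length - m) m).reverse).foldl (resStep b)
          (List.replicate arr.length 0, none) = (res, cur) ∧
        res.length = arr.length ∧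
        IsOMax arr (fun s => s < arr.length ∧ arr.length - m + 1 ≤ spanN arr s) cur ∧
        ∀ idx, arr.length - m ≤ idx → idx < arr.length →
          res.getD idx 0 = trueAns arr (idx + 1) := by
  intro m
  induction m with
  | zero =>
    intro _
    refine ⟨List.replicate arr.length 0, none, by simp, by simp, ?_,
      fun idx h1 h2 => absurd h2 (by omega)⟩
    rintro s ⟨hs1, hs2⟩
    have := (spanN_facts arr s hs1).2.1
    omega
  | succ k ih =>
    intro hm
    obtain ⟨res, cur, hfold, hlen, hcur, hres⟩ := ih (by omega)
    set t := arr.length - (k + 1) with hts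
    have htk : arr.length - k = t + 1 := by omega
    have htlt : t < arr.length := by omega
    -- the combined running maximum
    have hcomb : IsOMax arr
        (fun s => (s < arr.length ∧ spanN arr s = t + 1) ∨
                  (s < arr.length ∧ t + 2 ≤ spanN arr s)) (resCur b cur t) := by
      unfold resCur
      apply IsOMax_congr ?_ (IsOMax_combine (hb (t + 1) (by omega)) hcur)
      intro s
      constructor
      · rintro (⟨h1, h2⟩ | ⟨h1, h2⟩)
        · exact Or.inl ⟨h1, h2⟩
        · exact Or.inr ⟨h1, by omega⟩
      · rintro (⟨h1, h2⟩ | ⟨h1, h2⟩)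
        · exact Or.inl ⟨h1, h2⟩
        · exact Or.inr ⟨h1, by omega⟩
    have htrue : resCur b cur t = some (trueAns arr (t + 1)) := by
      apply IsOMax_unique (arr := arr)
        (cond := fun s => s < arr.length ∧ t + 1 ≤ spanN arr s)
      · apply IsOMax_congr ?_ hcomb
        intro s
        constructor
        · rintro (⟨h1, h2⟩ | ⟨h1, h2⟩) <;> exact ⟨h1, by omega⟩
        · rintro ⟨h1, h2⟩
          rcases Nat.eq_or_lt_of_le h2 with h | h
          · exact Or.inl ⟨h1, h.symm⟩
          · exact Or.inr ⟨h1, by omega⟩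
      · exact trueAns_isOMax arr (t + 1) (by omega) (by omega)
    refine ⟨res.set t (trueAns arr (t + 1)), resCur b cur t, ?_, by simpa using hlen, ?_, ?_⟩
    · have hrange : List.range' t (k + 1) = t :: List.range' (t + 1) k := List.range'_succ
      have hfold2 : ((List.range' (t + 1) k).reverse).foldl (resStep b)
          (List.replicate arr.length 0, none) = (res, cur) := by
        rw [← htk]
        exact hfold
      rw [hrange]
      simp only [List.reverse_cons]
      rw [List.foldl_append, hfold2]
      simp only [List.foldl_cons, List.foldl_nil, resStep]
      rw [htrue]
      simp only [Option.getD_some]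
    · apply IsOMax_congr ?_ hcomb
      intro s
      have hspan := fun (hs : s < arr.length) => (spanN_facts arr s hs).1
      constructor
      · rintro (⟨h1, h2⟩ | ⟨h1, h2⟩) <;> exact ⟨h1, by omega⟩
      · rintro ⟨h1, h2⟩
        rcases Nat.eq_or_lt_of_le h2 with h | h
        · exact Or.inl ⟨h1, by omega⟩
        · exact Or.inr ⟨h1, by omega⟩
    · intro idx hidx1 hidx2
      rcases Nat.eq_or_lt_of_le hidx1 with rfl | h
      · rw [getD_set_lt _ _ _ _ (by omega)]
      · rw [getD_set_ne _ _ _ _ _ (by omega), hres idx (by omega) hidx2]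
-- ---- B-side evaluation ----
theorem riddle_B_eval : ∀ (arr : List Int),
    riddle_alt arr = (List.range arr.length).map (fun i => trueAns arr (i + 1)) := by
  intro arr
  obtain ⟨lft, hlf, hllen, hlval⟩ := leftPass arr arr.length (le_refl _)
  obtain ⟨rgt, hrf, hrlen, hrval⟩ := rightPass arr arr.length (le_refl _)
  rw [Nat.sub_self] at hrf hrval
  rw [← List.range_eq_range'] at hrf
  obtain ⟨hblen, hbchar⟩ := bestPass arr lft rgt (fun j hj => hlval j hj)
    (fun j hj => hrval j (by omega) hj) arr.length (le_refl _)
  obtain ⟨res, cur, hresf, hreslen, _, hresval⟩ := resPass arr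
    ((List.range arr.length).foldl (bestStep arr lft rgt) (List.replicate (arr.length + 1) none))
    hbchar arr.length (le_refl _)
  rw [Nat.sub_self] at hresf hresval
  rw [← List.range_eq_range'] at hresf
  unfold riddle_alt
  simp only [hlf, hrf, hresf]
  apply List.ext_getElem
  · simpa using hreslen
  · intro i h1 h2
    simp only [List.getElem_map, List.getElem_range]
    rw [← List.getD_eq_getElem res 0 (by omega)]
    exact hresval i (by omega) (by omega)

-- ---- bridging A's fold with the true answer ----
theorem getLast?_range (m : Nat) : (List.range (m + 1)).getLast? = some m := by
  rw [List.range_succ]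
  simp

theorem minsL_getLast (arr : List Int) (w : Nat) :
    (minsL arr w).getLast? = some (wmin arr w (arr.length - w)) := by
  unfold minsL
  rw [List.getLast?_map, getLast?_range (arr.length - w)]
  rfl

theorem listMax_minsL_zero_iff (arr : List Int) (w : Nat) :
    listMax (minsL arr w) = 0 ↔
      ((∀ j, j < arr.length - w + 1 → wmin arr w j ≤ 0) ∧
       (∃ j, j < arr.length - w + 1 ∧ wmin arr w j = 0)) := by
  constructor
  · intro h
    refine ⟨?_, ?_⟩
    · intro j hj
      have hmem : wmin arr w j ∈ minsL arr w := mem_minsL.mpr ⟨j, hj, rfl⟩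
      have := le_listMax hmem
      omega
    · have hm := listMax_mem (minsL_ne_nil arr w)
      rw [mem_minsL] at hm
      obtain ⟨j, hj, hjv⟩ := hm
      exact ⟨j, hj, by omega⟩
  · rintro ⟨hall, j, hj, hjv⟩
    have h1 : listMax (minsL arr w) ≤ 0 := by
      have hm := listMax_mem (minsL_ne_nil arr w)
      rw [mem_minsL] at hm
      obtain ⟨j', hj', hjv'⟩ := hm
      rw [← hjv']
      exact hall j' hj'
    have h2 : (0 : Int) ≤ listMax (minsL arr w) := by
      rw [← hjv]
      exact le_listMax (mem_minsL.mpr ⟨j, hj, rfl⟩)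
    omega

-- ===== VERDICT (by name: the statement is the Claim_ definition above) =====
theorem riddle_spec : Claim_unchanged_riddle := by
  unfold Claim_unchanged_riddle
  intro arr _
  unfold Spec_riddle
  intro hnd
  rw [riddle_A_eval, riddle_B_eval]
  apply List.map_congr_left
  intro i hi
  have hin : i < arr.length := List.mem_range.mp hi
  obtain ⟨r, hr, h1, h2⟩ := bfold_char (minsL arr (i + 1)) (minsL_ne_nil arr (i + 1))
  rw [hr]
  simp only [Option.getD_some]
  by_cases hM : listMax (minsL arr (i + 1)) = 0
  · have hprops := (listMax_minsL_zero_iff arr (i + 1)).mp hM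
    have hin' : i + 1 ≤ arr.length := by omega
    have hnn : ¬ wmin arr (i + 1) (arr.length - (i + 1)) < 0 := by
      intro hneg
      refine hnd ((D_char arr).mpr ⟨i + 1, by omega, by omega, ?_, ?_, ?_⟩)
      · intro j hj
        exact (wmin_le_iff (by omega) (by omega)).mp (hprops.1 j hj)
      · obtain ⟨j, hj, hjv⟩ := hprops.2
        exact ⟨j, hj, (le_wmin_iff (by omega) (by omega)).mp (by omega)⟩
      · exact (wmin_lt_iff (by omega) (by omega)).mp hneg
    have hle : wmin arr (i + 1) (arr.length - (i + 1)) ≤ 0 := hprops.1 _ (by omega)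
    have hz : wmin arr (i + 1) (arr.length - (i + 1)) = 0 := by omega
    have hr0 := (h2 hM).1 (by rw [minsL_getLast, hz])
    rw [hr0]
    unfold trueAns
    omega
  · rw [h1 hM]
    rfl

theorem riddle_changed : Claim_changed_riddle := by
  unfold Claim_changed_riddle; decide

theorem riddle_tight : Claim_exact_riddle := by
  unfold Claim_exact_riddle
  intro arr _ hD heq
  obtain ⟨w, hwlt, hw1, h3, h4, h5⟩ := (D_char arr).mp hD
  have hall : ∀ j, j < arr.length - w + 1 → wmin arr w j ≤ 0 := fun j hj =>
    (wmin_le_iff (by omega) (by omega)).mpr (h3 j hj)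
  have hex : ∃ j, j < arr.length - w + 1 ∧ wmin arr w j = 0 := by
    obtain ⟨j, hj, hj4⟩ := h4
    exact ⟨j, hj, le_antisymm (hall j hj) ((le_wmin_iff (by omega) (by omega)).mpr hj4)⟩
  have hneg : wmin arr w (arr.length - w) < 0 :=
    (wmin_lt_iff (by omega) (by omega)).mpr h5
  have hM : listMax (minsL arr w) = 0 := (listMax_minsL_zero_iff arr w).mpr ⟨hall, hex⟩
  have hiw : w - 1 < arr.length := by omega
  rw [riddle_A_eval, riddle_B_eval] at heq
  have hptw := congrArg (fun L => L[w - 1]?) heq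
  simp only [List.getElem?_map, List.getElem?_range hiw, Option.map_some] at hptw
  have hw' : w - 1 + 1 = w := by omega
  rw [hw'] at hptw
  obtain ⟨r, hr, h1, h2⟩ := bfold_char (minsL arr w) (minsL_ne_nil arr w)
  have hrneg : r < 0 := (h2 hM).2 ⟨wmin arr w (arr.length - w), minsL_getLast arr w, hneg⟩
  rw [hr] at hptw
  simp only [Option.getD_some, Option.some_inj] at hptw
  have : trueAns arr w = 0 := hM
  omega
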